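-- pv_equiv track=rewrite | github.com/qwas15788hj/Practice | Programmers_모의고사.py | solution
-- ===== SOURCE A (Python) =====
-- def solution(answers):
--     list_1 = [1,2,3,4,5]
--     list_2 = [2,1,2,3,2,4,2,5]
--     list_3 = [3,3,1,1,2,2,4,4,5,5]
--     result = []
--
--     count = 0
--     for i in range(len(answers)):
--         if answers[i] == list_1[i%5]:
--             count += 1
--     result.append(count)
--
--     count = 0
--     for i in range(len(answers)):
--         if answers[i] == list_2[i%8]:
--             count += 1
--     result.append(count)
--
--     count = 0
--     for i in range(len(answers)):
--         if answers[i] == list_3[i%10]: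
--             count += 1
--     result.append(count)
--
--     max_score = max(result)
--     answer = []
--     for i in range(len(result)):
--         if result[i] == max_score:
--             answer.append(i+1)
--
--     return answer
-- ===== SOURCE B (Python) =====
-- def solution(answers):
--     PERIOD = 40  # lcm of the three pattern lengths: indices equal mod 40 see identical pattern values
--     cnt = {}
--     for i, a in enumerate(answers):
--         k = (i % PERIOD, a)
--         cnt[k] = cnt.get(k, 0) + 1
--     patterns = [[1, 2, 3, 4, 5],
--                 [2, 1, 2, 3, 2, 4, 2, 5],
--                 [3, 3, 1, 1, 2, 2, 4, 4, 5, 5]]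
--     scores = [sum(cnt.get((t, p[t % len(p)]), 0) for t in range(PERIOD))
--               for p in patterns]
--     best = max(scores)
--     return [j + 1 for j, s in enumerate(scores) if s == best]
-- ===== Notes on version B (the rewrite author's own statement) =====
-- stated objective: alternative
-- what changed: Replaces A's per-pattern scans comparing every answer against a cycled pattern by a residue-class histogram: one dict counting (index mod 40, answer) pairs (40 = lcm of the pattern lengths), after which each score is a sum of 40 dict lookups, so no pattern comparison ever touches the answers.
import Mathlib
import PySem

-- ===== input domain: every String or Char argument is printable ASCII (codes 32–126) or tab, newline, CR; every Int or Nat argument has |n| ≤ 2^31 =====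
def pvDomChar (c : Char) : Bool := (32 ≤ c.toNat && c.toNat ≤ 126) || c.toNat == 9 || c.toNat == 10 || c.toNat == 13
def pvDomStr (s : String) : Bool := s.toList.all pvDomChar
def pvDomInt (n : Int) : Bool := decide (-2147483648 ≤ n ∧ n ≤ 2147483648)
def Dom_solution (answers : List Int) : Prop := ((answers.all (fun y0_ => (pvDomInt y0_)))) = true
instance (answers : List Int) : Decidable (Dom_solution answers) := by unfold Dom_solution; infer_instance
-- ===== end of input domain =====

-- B replaces A's per-pattern scans of the answers by a residue-class histogram: one dict counting
-- (index mod 40, answer) pairs (40 = lcm of the pattern lengths), then each score is a sum of 40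
-- dict lookups (alternative algorithm, same cost).

-- ===== PORT A =====
def solution (answers : List Int) : List Int :=
  let list1 : List Int := [1, 2, 3, 4, 5]
  let list2 : List Int := [2, 1, 2, 3, 2, 4, 2, 5]
  let list3 : List Int := [3, 3, 1, 1, 2, 2, 4, 4, 5, 5]
  let count1 : Int := (PySem.List.pyRange 0 (PySem.List.len answers)).foldl
    (fun c i => if PySem.List.pyGetD answers i 0 = PySem.List.pyGetD list1 (PySem.Int.mod i 5) 0 then c + 1 else c) 0
  let count2 : Int := (PySem.List.pyRange 0 (PySem.List.len answers)).foldl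
    (fun c i => if PySem.List.pyGetD answers i 0 = PySem.List.pyGetD list2 (PySem.Int.mod i 8) 0 then c + 1 else c) 0
  let count3 : Int := (PySem.List.pyRange 0 (PySem.List.len answers)).foldl
    (fun c i => if PySem.List.pyGetD answers i 0 = PySem.List.pyGetD list3 (PySem.Int.mod i 10) 0 then c + 1 else c) 0
  let result : List Int := [count1, count2, count3]
  -- result has length 3, so Python's max(result) never raises; .getD 0 is never used
  let maxScore : Int := (PySem.List.max? result id).getD 0
  (PySem.List.pyRange 0 (PySem.List.len result)).foldl
    (fun a i => if PySem.List.pyGetD result i 0 = maxScore then a ++ [i + 1] else a) []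

-- ===== PORT B =====
def solution_alt (answers : List Int) : List Int :=
  -- cnt[(i % 40, a)] += 1 over enumerate(answers)  ('k' of Source B inlined)
  let cnt : PySem.Dict (Int × Int) Int := (PySem.List.enumerate answers).foldl
    (fun d ia => d.insert (PySem.Int.mod ia.1 40, ia.2)
                  (d.getD (PySem.Int.mod ia.1 40, ia.2) 0 + 1)) PySem.Dict.empty
  let patterns : List (List Int) :=
    [[1, 2, 3, 4, 5], [2, 1, 2, 3, 2, 4, 2, 5], [3, 3, 1, 1, 2, 2, 4, 4, 5, 5]]
  let scores : List Int := patterns.map (fun p =>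
    ((PySem.List.pyRange 0 40).map
      (fun t => cnt.getD (t, PySem.List.pyGetD p (PySem.Int.mod t (PySem.List.len p)) 0) 0)).sum)
  -- scores has length 3, so Python's max(scores) never raises; .getD 0 is never used
  let best : Int := (PySem.List.max? scores id).getD 0
  (PySem.List.enumerate scores).foldl
    (fun a js => if js.2 = best then a ++ [js.1 + 1] else a) []

-- ===== PRECONDITION & SPEC =====
def Spec_solution (answers : List Int) (out : List Int) : Prop := out = solution_alt answers
instance (answers : List Int) (out : List Int) : Decidable (Spec_solution answers out) := by unfold Spec_solution; infer_instance

-- ===== CLAIM (what is proved, stated in full; the proofs are below) =====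
def Claim_equal_solution : Prop := ∀ (answers : List Int), Dom_solution answers → Spec_solution answers (solution answers)

-- ===== LEMMAS AND PROOFS =====

-- A's index loop over range(len(answers)) counts the same matches as a fold over enumerate(answers).
theorem range_fold_eq_enumerate_fold (p : List Int) (m : Int) (answers : List Int) (c : Int) :
    (PySem.List.pyRange 0 (PySem.List.len answers)).foldl
      (fun c i => if PySem.List.pyGetD answers i 0 = PySem.List.pyGetD p (PySem.Int.mod i m) 0 then c + 1 else c) c
    = (PySem.List.enumerate answers).foldl
      (fun c ia => if ia.2 = PySem.List.pyGetD p (PySem.Int.mod ia.1 m) 0 then c + 1 else c) c := by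
  induction answers using List.reverseRecOn with
  | nil => simp [PySem.List.enumerate]
  | append_singleton xs x ih =>
      have hlen : PySem.List.len (xs ++ [x]) = (xs.length : Int) + 1 := by
        simp [PySem.List.len_eq]
      have hr : PySem.List.pyRange 0 ((xs.length : Int) + 1)
          = PySem.List.pyRange 0 (xs.length : Int) ++ [(xs.length : Int)] :=
        PySem.List.pyRange_one_succ_right (by omega)
      rw [hlen, hr, PySem.List.enumerate_append, List.foldl_append, List.foldl_append]
      have hcongr : (PySem.List.pyRange 0 (xs.length : Int)).foldl
          (fun c i => if PySem.List.pyGetD (xs ++ [x]) i 0 = PySem.List.pyGetD p (PySem.Int.mod i m) 0 then c + 1 else c) c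
          = (PySem.List.pyRange 0 (xs.length : Int)).foldl
          (fun c i => if PySem.List.pyGetD xs i 0 = PySem.List.pyGetD p (PySem.Int.mod i m) 0 then c + 1 else c) c := by
        apply PySem.List.foldl_congr_mem
        intro acc i hi
        rw [PySem.List.mem_pyRange_one] at hi
        rw [PySem.List.pyGetD_eq_getElem (xs ++ [x]) 0 hi.1 (by simp; omega),
            PySem.List.pyGetD_eq_getElem xs 0 hi.1 (by simpa [PySem.List.len_eq] using hi.2),
            List.getElem_append_left]
      rw [hcongr, ← PySem.List.len_eq, ih]
      simp [PySem.List.enumerate, PySem.List.pyGetD_natCast]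

-- A nodup index list hitting xa exactly once: the indicator sum collapses to one test.
theorem sum_map_ite_pair (f : Int → Int) (L : List Int) (hnd : L.Nodup) (xa xb : Int)
    (hmem : xa ∈ L) :
    (L.map (fun t => if (t, f t) = (xa, xb) then (1 : Int) else 0)).sum
      = if xb = f xa then 1 else 0 := by
  induction L with
  | nil => cases hmem
  | cons h t ih =>
      simp only [List.map_cons, List.sum_cons]
      rcases List.mem_cons.mp hmem with he | ht
      · subst he
        have hnot : xa ∉ t := (List.nodup_cons.mp hnd).1
        have hz : (t.map (fun s => if (s, f s) = (xa, xb) then (1 : Int) else 0)).sum = 0 := by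
          apply List.sum_eq_zero
          intro y hy
          rcases List.mem_map.mp hy with ⟨s, hs, rfl⟩
          have hne : ¬ (s, f s) = (xa, xb) := by
            intro hc
            apply hnot
            have hsa : s = xa := congrArg Prod.fst hc
            exact hsa ▸ hs
          simp [hne]
        rw [hz, add_zero]
        by_cases hfx : xb = f xa
        · rw [if_pos (by rw [hfx]), if_pos hfx]
        · rw [if_neg (fun hc => hfx (congrArg Prod.snd hc).symm), if_neg hfx]
      · have hha : h ≠ xa := by
          intro hc
          exact (List.nodup_cons.mp hnd).1 (hc ▸ ht)
        rw [if_neg (fun hc => hha (congrArg Prod.fst hc)), zero_add,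
            ih (List.nodup_cons.mp hnd).2 ht]

-- Summing per-residue counts over a nodup index list covering all first components
-- equals counting pairs whose second component matches the pattern value at its residue.
theorem sum_count_eq_countP (f : Int → Int) (xs : List (Int × Int)) (L : List Int)
    (hnd : L.Nodup) (hx : ∀ x ∈ xs, x.1 ∈ L) :
    (L.map (fun t => ((xs.count (t, f t) : Nat) : Int))).sum
      = ((xs.countP (fun x => decide (x.2 = f x.1)) : Nat) : Int) := by
  induction xs with
  | nil => simp
  | cons x xs ih =>
      have hxm : x.1 ∈ L := hx x (by simp)
      have hstep : ∀ t : Int, (((x :: xs).count (t, f t) : Nat) : Int)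
          = ((xs.count (t, f t) : Nat) : Int) + (if (t, f t) = (x.1, x.2) then (1 : Int) else 0) := by
        intro t
        rw [List.count_cons]
        by_cases h : x = (t, f t)
        · simp [h]
        · have h' : ¬ (t, f t) = (x.1, x.2) := fun hc => h hc.symm
          simp [h, h']
      calc (L.map (fun t => (((x :: xs).count (t, f t) : Nat) : Int))).sum
          = (L.map (fun t => ((xs.count (t, f t) : Nat) : Int)
              + (if (t, f t) = (x.1, x.2) then (1 : Int) else 0))).sum := by
            congr 1; exact List.map_congr_left (fun t _ => hstep t)
        _ = (L.map (fun t => ((xs.count (t, f t) : Nat) : Int))).sum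
              + (L.map (fun t => if (t, f t) = (x.1, x.2) then (1 : Int) else 0)).sum :=
            PySem.List.sum_map_add_int L _ _
        _ = ((xs.countP (fun y => decide (y.2 = f y.1)) : Nat) : Int)
              + (if x.2 = f x.1 then 1 else 0) := by
            rw [ih (fun y hy => hx y (by simp [hy])), sum_map_ite_pair f L hnd x.1 x.2 hxm]
        _ = (((x :: xs).countP (fun y => decide (y.2 = f y.1)) : Nat) : Int) := by
            rw [List.countP_cons]
            by_cases h : x.2 = f x.1 <;> simp [h]

-- B's histogram score for one pattern equals the match count over enumerate(answers).
theorem histogram_score (answers p : List Int) (m : Int) (hm : 0 < m) (hdvd : m ∣ 40) :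
    ((PySem.List.pyRange 0 40).map (fun t =>
        ((PySem.List.enumerate answers).foldl
          (fun d ia => d.insert (PySem.Int.mod ia.1 40, ia.2)
              (d.getD (PySem.Int.mod ia.1 40, ia.2) 0 + 1)) PySem.Dict.empty).getD
          (t, PySem.List.pyGetD p (PySem.Int.mod t m) 0) 0)).sum
    = (((PySem.List.enumerate answers).countP
          (fun ia => decide (ia.2 = PySem.List.pyGetD p (PySem.Int.mod ia.1 m) 0)) : Nat) : Int) := by
  have hfold : (PySem.List.enumerate answers).foldl
      (fun d ia => d.insert (PySem.Int.mod ia.1 40, ia.2)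
          (d.getD (PySem.Int.mod ia.1 40, ia.2) 0 + 1)) PySem.Dict.empty
      = PySem.Dict.counter ((PySem.List.enumerate answers).map
          (fun ia => (PySem.Int.mod ia.1 40, ia.2))) := by
    rw [← PySem.Dict.foldl_insert_getD_add_one_eq_counter, List.foldl_map]
  rw [hfold]
  have hlookup : ∀ t : Int,
      (PySem.Dict.counter ((PySem.List.enumerate answers).map
          (fun ia => (PySem.Int.mod ia.1 40, ia.2)))).getD
        (t, PySem.List.pyGetD p (PySem.Int.mod t m) 0) 0
      = ((((PySem.List.enumerate answers).map (fun ia => (PySem.Int.mod ia.1 40, ia.2))).count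
          (t, PySem.List.pyGetD p (PySem.Int.mod t m) 0) : Nat) : Int) := by
    intro t
    exact PySem.Dict.getD_counter _ _
  rw [List.map_congr_left (fun t _ => hlookup t)]
  rw [sum_count_eq_countP (fun t => PySem.List.pyGetD p (PySem.Int.mod t m) 0)
        ((PySem.List.enumerate answers).map (fun ia => (PySem.Int.mod ia.1 40, ia.2)))
        (PySem.List.pyRange 0 40) (by decide)
        (by
          intro x hx
          rcases List.mem_map.mp hx with ⟨ia, _, rfl⟩
          rw [PySem.List.mem_pyRange_one]
          exact ⟨PySem.Int.mod_nonneg _ (by omega), PySem.Int.mod_lt _ (by omega)⟩)]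
  rw [List.countP_map]
  congr 1
  apply List.countP_congr
  intro ia _
  simp only [Function.comp]
  have hcol : PySem.Int.mod (PySem.Int.mod ia.1 40) m = PySem.Int.mod ia.1 m := by
    rw [PySem.Int.mod_eq_emod_of_pos hm, PySem.Int.mod_eq_emod_of_pos (by omega : (0:Int) < 40),
        PySem.Int.mod_eq_emod_of_pos hm]
    exact Int.emod_emod_of_dvd _ hdvd
  rw [hcol]

-- ===== VERDICT (by name: the statement is the Claim_ definition above) =====
theorem solution_spec : Claim_equal_solution := by
  intro answers _
  unfold Spec_solution solution solution_alt
  dsimp only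
  simp only [List.map_cons, List.map_nil,
    show PySem.List.len ([1,2,3,4,5] : List Int) = 5 from by decide,
    show PySem.List.len ([2,1,2,3,2,4,2,5] : List Int) = 8 from by decide,
    show PySem.List.len ([3,3,1,1,2,2,4,4,5,5] : List Int) = 10 from by decide]
  rw [histogram_score answers [1,2,3,4,5] 5 (by omega) (by decide),
      histogram_score answers [2,1,2,3,2,4,2,5] 8 (by omega) (by decide),
      histogram_score answers [3,3,1,1,2,2,4,4,5,5] 10 (by omega) (by decide),
      range_fold_eq_enumerate_fold, range_fold_eq_enumerate_fold, range_fold_eq_enumerate_fold,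
      PySem.List.foldl_ite_add_one, PySem.List.foldl_ite_add_one, PySem.List.foldl_ite_add_one]
  simp only [zero_add]
  generalize (((PySem.List.enumerate answers).countP
      (fun ia => decide (ia.2 = PySem.List.pyGetD ([1,2,3,4,5] : List Int) (PySem.Int.mod ia.1 5) 0)) : Nat) : Int) = c1
  generalize (((PySem.List.enumerate answers).countP
      (fun ia => decide (ia.2 = PySem.List.pyGetD ([2,1,2,3,2,4,2,5] : List Int) (PySem.Int.mod ia.1 8) 0)) : Nat) : Int) = c2
  generalize (((PySem.List.enumerate answers).countP
      (fun ia => decide (ia.2 = PySem.List.pyGetD ([3,3,1,1,2,2,4,4,5,5] : List Int) (PySem.Int.mod ia.1 10) 0)) : Nat) : Int) = c3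
  have h3 : PySem.List.pyRange 0 (PySem.List.len [c1, c2, c3]) = [0, 1, 2] := by
    rw [show PySem.List.len [c1, c2, c3] = 3 from by simp [PySem.List.len_eq]]
    decide
  rw [h3]
  norm_num [PySem.List.enumerate, PySem.List.pyGetD, PySem.List.pyGet?, PySem.List.pyIdx?]
  rfl
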